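-- pv_equiv track=rewrite | github.com/nbice1/First-Order-Logic | fol_syntax_semantics.py | bound_replace
-- ===== SOURCE A (Python) =====
-- def new_name(name, name_set, count=0):
--     if name in name_set:
--         n_name = name + str(count)
--         count += 1
--         return new_name(n_name, name_set, count)
--     else:
--         return name
--
-- def bound_replace(formula, all_vars):
--     formula = str(formula)
--     q_ind = 0
--     new_form = formula
--     for n in range(len(formula)):
--         if formula[n] == 'U' or formula[n] == 'X':
--             q_ind = n
--             for m in range(n+1,len(formula)):
--                 if formula[m].isupper() or formula[m] == '(':
--                     old_var = formula[n+1:m]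
--                     break
--             new_var = new_name(old_var, all_vars)
--             all_vars.add(new_var)
--             par_count = 0
--             for m in range(n+2,len(formula)):
--                 if formula[m] == '(':
--                     par_count +=1
--                 if formula[m] == ')':
--                     par_count -=1
--                     if par_count == 0:
--                         ind = m
--                         break
--             scope = formula[n:ind+1]
--             rep = scope.replace(old_var, new_var)
--             new_form = formula[:n] + rep + formula[ind+1:]
--             break
--     if 'U' not in formula[q_ind+1:] and 'X' not in formula[q_ind+1:]:
--         return new_form
--     else:
--         final_form = new_form[:q_ind+1] + bound_replace(new_form[q_ind+1:], all_vars)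
--         return final_form
-- ===== SOURCE B (Python) =====
-- def new_name(name, name_set, count=0):
--     if name in name_set:
--         return new_name(name + str(count), name_set, count + 1)
--     return name
--
-- def first_quantifier(s, start):
--     for i in range(start, len(s)):
--         if s[i] == 'U' or s[i] == 'X':
--             return i
--     return None
--
-- def closing_paren(s, start):
--     depth = 0
--     for j in range(start, len(s)):
--         if s[j] == '(':
--             depth += 1
--         elif s[j] == ')':
--             if depth == 1:
--                 return j
--             depth -= 1
--     return None
--
-- def bound_replace(formula, all_vars):
--     # Iterative: finished chunks pile up in a list, joined once at the end.
--     work = str(formula)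
--     chunks = []
--     q = first_quantifier(work, 0)
--     while q is not None:
--         j = q + 1
--         while j < len(work) and not (work[j].isupper() or work[j] == '('):
--             j += 1
--         if j == len(work):
--             raise ValueError("quantifier without variable")
--         old_var = work[q + 1:j]
--         new_var = new_name(old_var, all_vars)
--         all_vars.add(new_var)
--         ind = closing_paren(work, q + 2)
--         if ind is None:
--             raise ValueError("unbalanced parentheses")
--         head, scope, tail = work[:q], work[q:ind + 1], work[ind + 1:]
--         new_form = head + scope.replace(old_var, new_var) + tail
--         if first_quantifier(work, q + 1) is None:
--             return ''.join(chunks) + new_form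
--         chunks.append(new_form[:q + 1])
--         work = new_form[q + 1:]
--         q = first_quantifier(work, 0)
--     return ''.join(chunks) + work
-- ===== Notes on version B (the rewrite author's own statement) =====
-- stated objective: alternative
-- what changed: A's outer recursion (rewrite the first quantifier's scope, recurse on the tail, re-concatenate on return) becomes a flat while-loop that appends finished pieces to a chunk list joined once at the end; the three inner scans are factored into small total helpers: an explicit quantifier finder returning None, a takewhile-style variable scan that validates its end, and a depth-counting paren matcher with an early return, instead of A's for/break loops that leave variables unbound on failure.
-- outside the precondition, e.g. on bound_replace('X((P))', set()): A returns 'X((P))', B returns 'X((P))'; on bound_replace('Ua)((C))', set()): A returns 'Ua)((C))', B returns 'Ua)((C))'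
import Mathlib
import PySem

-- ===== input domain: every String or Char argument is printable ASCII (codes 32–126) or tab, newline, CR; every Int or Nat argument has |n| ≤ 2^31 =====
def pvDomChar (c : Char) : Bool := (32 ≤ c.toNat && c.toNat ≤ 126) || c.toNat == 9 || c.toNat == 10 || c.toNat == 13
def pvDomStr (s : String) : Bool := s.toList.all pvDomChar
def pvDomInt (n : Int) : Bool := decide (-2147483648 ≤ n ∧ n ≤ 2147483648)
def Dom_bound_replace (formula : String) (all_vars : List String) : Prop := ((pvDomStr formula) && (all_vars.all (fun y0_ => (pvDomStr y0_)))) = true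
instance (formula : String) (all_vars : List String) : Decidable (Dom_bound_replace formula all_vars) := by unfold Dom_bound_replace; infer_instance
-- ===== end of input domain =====

-- B replaces A's outer recursion by a flat chunk-collecting loop with small total helper scans (alternative
-- decomposition, same cost); both Pythons mutate the all_vars set in place — the equivalence proved here is
-- about the RETURN value only.

-- ===== PORT A =====
-- shared character tests (both Pythons test the same characters) and the shared module helper new_name
def pvIsQ (c : Char) : Bool := c == 'U' || c == 'X'

def pvIsVarStop (c : Char) : Bool := PySem.Chars.isupper c || c == '('

-- new_name(name, name_set, count): fuel = |name_set|+1 suffices (each recursion needs a distinct member of the set)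
def pvNewName : Nat → List Char → List String → Int → List Char
  | 0, name, _, _ => name
  | fuel + 1, name, vars, count =>
    if PySem.Set.contains vars (String.ofList name) then
      pvNewName fuel (name ++ PySem.Int.toChars count) vars (count + 1)
    else name

-- A's par_count scan: for m in range(n+2,len): '(' += 1; ')' -= 1, break when 0 — offset from the scan start
-- (none = Python's `ind` stays unbound)
def pvParScan : List Char → Int → Option Nat
  | [], _ => none
  | c :: rest, k =>
    let k1 := if c == '(' then k + 1 else k
    let k2 := if c == ')' then k1 - 1 else k1
    if c == ')' && k2 == 0 then some 0
    else (pvParScan rest k2).map (· + 1)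

-- A's recursion, fuel = |formula|+1 (≥ number of quantifiers + 1); none = a Python exception (NameError)
def pvGoA : Nat → List Char → List String → Option (List Char × List String)
  | 0, _, _ => none
  | fuel + 1, cs, vars =>
    match cs.findIdx? pvIsQ with
    | none =>
      -- q_ind = 0, new_form = formula
      if !(PySem.Chars.isIn ['U'] (cs.drop 1)) && !(PySem.Chars.isIn ['X'] (cs.drop 1)) then
        some (cs, vars)
      else (pvGoA fuel (cs.drop 1) vars).map (fun r => (cs.take 1 ++ r.1, r.2))
    | some q =>
      match (cs.drop (q + 1)).findIdx? pvIsVarStop with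
      | none => none      -- Python: old_var unbound → NameError
      | some moff =>
        let old_var := (cs.drop (q + 1)).take moff             -- formula[n+1:m]
        let new_var := pvNewName (vars.length + 1) old_var vars 0
        let vars' := PySem.Set.add vars (String.ofList new_var)    -- all_vars.add(new_var)
        match pvParScan (cs.drop (q + 2)) 0 with
        | none => none    -- Python: ind unbound → NameError
        | some o =>
          let ind := q + 2 + o
          let scope := (cs.drop q).take (ind + 1 - q)          -- formula[n:ind+1]
          let rep := PySem.Chars.replace scope old_var new_var
          let new_form := cs.take q ++ rep ++ cs.drop (ind + 1)
          if !(PySem.Chars.isIn ['U'] (cs.drop (q + 1))) && !(PySem.Chars.isIn ['X'] (cs.drop (q + 1))) then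
            some (new_form, vars')
          else (pvGoA fuel (new_form.drop (q + 1)) vars').map (fun r => (new_form.take (q + 1) ++ r.1, r.2))

def bound_replace (formula : String) (all_vars : List String) : String :=
  match pvGoA (formula.toList.length + 1) formula.toList all_vars with
  | some r => String.ofList r.1
  | none => ""            -- unreachable under Pre_ (Python raises there)

-- ===== PORT B =====
-- first_quantifier(s, start): index loop carrying the absolute position
def pvScanQ : List Char → Nat → Option Nat
  | [], _ => none
  | c :: rest, i => if pvIsQ c then some i else pvScanQ rest (i + 1)

def pvFirstQ (s : List Char) (start : Nat) : Option Nat := pvScanQ (s.drop start) start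

-- the j-while loop collecting the variable token until an uppercase or '('
def pvTokenScan : List Char → List Char
  | [] => []
  | c :: rest => if pvIsVarStop c then [] else c :: pvTokenScan rest

-- closing_paren(s, start): depth counter with an early return when a ')' meets depth 1 (offset from start)
def pvCloseB : List Char → Int → Option Nat
  | [], _ => none
  | c :: rest, depth =>
    if c == '(' then (pvCloseB rest (depth + 1)).map (· + 1)
    else if c == ')' then
      if depth == 1 then some 0 else (pvCloseB rest (depth - 1)).map (· + 1)
    else (pvCloseB rest depth).map (· + 1)

-- the while-loop of Source B: finished chunks accumulate in a list, joined once on return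
def pvLoopB : Nat → List (List Char) → List Char → List String → Option (List Char × List String)
  | 0, _, _, _ => none
  | fuel + 1, chunks, work, vars =>
    match pvFirstQ work 0 with
    | none => some (chunks.flatten ++ work, vars)
    | some q =>
      let tok := pvTokenScan (work.drop (q + 1))
      if tok.length == (work.drop (q + 1)).length then none   -- raise ValueError: quantifier without variable
      else
        let new_var := pvNewName (vars.length + 1) tok vars 0
        let vars' := PySem.Set.add vars (String.ofList new_var)
        match pvCloseB (work.drop (q + 2)) 0 with
        | none => none   -- raise ValueError: unbalanced parentheses
        | some off =>
          let ind := q + 2 + off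
          let head := work.take q
          let scope := (work.drop q).take (ind + 1 - q)
          let tail := work.drop (ind + 1)
          let new_form := head ++ PySem.Chars.replace scope tok new_var ++ tail
          match pvFirstQ work (q + 1) with
          | none => some (chunks.flatten ++ new_form, vars')
          | some _ => pvLoopB fuel (chunks ++ [new_form.take (q + 1)]) (new_form.drop (q + 1)) vars'

def bound_replace_alt (formula : String) (all_vars : List String) : String :=
  match pvLoopB (formula.toList.length + 1) [] formula.toList all_vars with
  | some r => String.ofList r.1
  | none => ""

-- ===== PRECONDITION & SPEC =====
-- Does a ')' at index mm ≥ n+2 close the scope opened after the quantifier at n? (A's par_count scan succeeds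
-- iff some such index exists: the first ')' whose acc since n+2 holds exactly one more '(' than ')')
def pvHasClose (cs : List Char) (n : Nat) : Bool :=
  (List.range cs.length).any fun mm =>
    decide (n + 2 ≤ mm) && (cs.getD mm ' ' == ')') &&
      (((cs.drop (n + 2)).take (mm - (n + 2))).count '(' == ((cs.drop (n + 2)).take (mm - (n + 2))).count ')' + 1)

-- local well-formedness of the quantifier at index n: a following uppercase/'(' exists, the variable token
-- before it is nonempty and contains no ')', and the opened scope has a closing ')'
def pvGoodAt (cs : List Char) (n : Nat) : Bool :=
  match (cs.drop (n + 1)).findIdx? pvIsVarStop with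
  | none => false
  | some m => decide (0 < m) && !(((cs.drop (n + 1)).take m).contains ')') && pvHasClose cs n

-- Pre_ excludes exactly the ill-formed quantifiers: where no uppercase/'(' or no closing ')' follows, A raises
-- NameError; and it also excludes formulas in which some quantifier has an EMPTY variable token or a ')' inside
-- its token — there A's raising/returning (and its value, via the empty-pattern str.replace) depends on the
-- rewritten string, so no local closed-form condition separates the returning cases; A sometimes returns there.
def Pre_bound_replace (formula : String) (all_vars : List String) : Prop :=
  ∀ n, n < formula.toList.length → pvIsQ (formula.toList.getD n ' ') = true → pvGoodAt formula.toList n = true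

instance (formula : String) (all_vars : List String) : Decidable (Pre_bound_replace formula all_vars) := by
  unfold Pre_bound_replace; infer_instance

def pvWitness_bound_replace : String × List String := ("Ux(P(x) & Xy(Q(y)))", ["x"])

def Spec_bound_replace (formula : String) (all_vars : List String) (out : String) : Prop := out = bound_replace_alt formula all_vars
instance (formula : String) (all_vars : List String) (out : String) : Decidable (Spec_bound_replace formula all_vars out) := by unfold Spec_bound_replace; infer_instance

-- ===== CLAIM (what is proved, stated in full; the proofs are below) =====
def Claim_equal_bound_replace : Prop := ∀ (formula : String) (all_vars : List String), Dom_bound_replace formula all_vars → Pre_bound_replace formula all_vars → Spec_bound_replace formula all_vars (bound_replace formula all_vars)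

-- ===== LEMMAS AND PROOFS =====

-- B's index-carrying quantifier scan is A's findIdx? shifted by the carried start
theorem pvScanQ_eq (cs : List Char) : ∀ i, pvScanQ cs i = (cs.findIdx? pvIsQ).map (fun j => i + j) := by
  induction cs with
  | nil => intro i; rfl
  | cons c rest ih =>
    intro i
    rw [pvScanQ, List.findIdx?_cons]
    by_cases h : pvIsQ c
    · simp [h]
    · simp only [h, if_neg, Bool.false_eq_true, not_false_eq_true, ih (i + 1),
        Option.map_map]
      cases rest.findIdx? pvIsQ <;> simp [Nat.add_assoc, Nat.add_comm 1]

-- B's token scan vs. A's findIdx?-and-slice: no stop char → the whole list (same length);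
-- stop at m → the first m chars (length m < length)
theorem pvTokenScan_none (cs : List Char) (h : cs.findIdx? pvIsVarStop = none) : pvTokenScan cs = cs := by
  induction cs with
  | nil => rfl
  | cons c rest ih =>
    rw [List.findIdx?_cons] at h
    by_cases hc : pvIsVarStop c
    · simp [hc] at h
    · simp only [hc, Bool.false_eq_true, if_false, Option.map_eq_none_iff] at h
      rw [pvTokenScan, if_neg (by simp [hc]), ih h]

theorem pvTokenScan_some (cs : List Char) : ∀ m, cs.findIdx? pvIsVarStop = some m →
    pvTokenScan cs = cs.take m ∧ m < cs.length := by
  induction cs with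
  | nil => intro m h; simp at h
  | cons c rest ih =>
    intro m h
    rw [List.findIdx?_cons] at h
    by_cases hc : pvIsVarStop c
    · simp only [hc, if_true, Option.some.injEq] at h
      subst h
      exact ⟨by rw [pvTokenScan, if_pos hc]; rfl, by simp⟩
    · simp only [hc, Bool.false_eq_true, if_false, Option.map_eq_some_iff] at h
      obtain ⟨m', hm', rfl⟩ := h
      obtain ⟨h1, h2⟩ := ih m' hm'
      exact ⟨by rw [pvTokenScan, if_neg (by simp [hc]), h1]; rfl, by simpa using h2⟩

-- B's depth counter with early return computes exactly A's par_count scan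
theorem pvCloseB_eq (l : List Char) : ∀ k, pvCloseB l k = pvParScan l k := by
  induction l with
  | nil => intro k; rfl
  | cons c rest ih =>
    intro k
    rw [pvCloseB, pvParScan]
    by_cases ho : c == '('
    · have hc : (c == ')') = false := by
        rw [beq_iff_eq] at ho; subst ho; decide
      simp [ho, hc, ih]
    · by_cases hc : c == ')'
      · by_cases hk : k = 1
        · simp [ho, hc, hk]
        · have hne : ((k - 1 : Int) == 0) = false := by
            simp only [beq_eq_false_iff_ne, ne_eq]; omega
          simp [ho, hc, hne, hk, ih]
      · simp [ho, hc, ih]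

-- A's two membership tests say exactly "no quantifier in the tail"
theorem quantFree_eq (t : List Char) :
    ((!PySem.Chars.isIn ['U'] t) && (!PySem.Chars.isIn ['X'] t)) = (t.findIdx? pvIsQ).isNone := by
  cases hf : t.findIdx? pvIsQ with
  | none =>
    have hall := List.findIdx?_eq_none_iff.mp hf
    have hU : PySem.Chars.isIn ['U'] t = false := by
      rw [PySem.Chars.isIn_eq_false_iff]
      intro hinf
      have := hall 'U' (hinf.subset (List.mem_singleton_self 'U'))
      simp [pvIsQ] at this
    have hX : PySem.Chars.isIn ['X'] t = false := by
      rw [PySem.Chars.isIn_eq_false_iff]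
      intro hinf
      have := hall 'X' (hinf.subset (List.mem_singleton_self 'X'))
      simp [pvIsQ] at this
    simp [hU, hX]
  | some m =>
    obtain ⟨hm, hp, -⟩ := List.findIdx?_eq_some_iff_getElem.mp hf
    have hmem : t[m] ∈ t := List.getElem_mem hm
    rw [pvIsQ, Bool.or_eq_true, beq_iff_eq, beq_iff_eq] at hp
    rcases hp with h | h
    · have : PySem.Chars.isIn ['U'] t = true := by
        rw [PySem.Chars.isIn_iff_infix]
        exact (List.singleton_infix_iff 'U' t).mpr (h ▸ hmem)
      simp [this]
    · have : PySem.Chars.isIn ['X'] t = true := by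
        rw [PySem.Chars.isIn_iff_infix]
        exact (List.singleton_infix_iff 'X' t).mpr (h ▸ hmem)
      simp [this]

-- the chunk-collecting loop computes A's recursion with the flattened chunks appended in front
theorem pvLoopB_eq_pvGoA (fuel : Nat) : ∀ (work : List Char) (vars : List String) (chunks : List (List Char)),
    pvLoopB fuel chunks work vars = (pvGoA fuel work vars).map (fun r => (chunks.flatten ++ r.1, r.2)) := by
  induction fuel with
  | zero => intro work vars chunks; rfl
  | succ fuel ih =>
    intro work vars chunks
    rw [pvLoopB, pvGoA]
    have hfq0 : pvFirstQ work 0 = work.findIdx? pvIsQ := by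
      rw [pvFirstQ, List.drop_zero, pvScanQ_eq]
      cases work.findIdx? pvIsQ <;> simp
    rw [hfq0]
    cases hq : work.findIdx? pvIsQ with
    | none =>
      have hdrop : (work.drop 1).findIdx? pvIsQ = none := by
        rw [List.findIdx?_eq_none_iff]
        intro c hc
        exact List.findIdx?_eq_none_iff.mp hq c (List.drop_subset 1 work hc)
      rw [quantFree_eq, hdrop]
      rfl
    | some q =>
      simp only
      cases hstop : (work.drop (q + 1)).findIdx? pvIsVarStop with
      | none =>
        rw [pvTokenScan_none _ hstop]
        simp
      | some moff =>
        obtain ⟨htok, hlt⟩ := pvTokenScan_some _ _ hstop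
        have hlen : ((pvTokenScan (work.drop (q + 1))).length == (work.drop (q + 1)).length) = false := by
          rw [htok, List.length_take, beq_eq_false_iff_ne]
          omega
        rw [hlen, htok, pvCloseB_eq]
        simp only [Bool.false_eq_true, if_false]
        cases hpar : pvParScan (work.drop (q + 2)) 0 with
        | none => rfl
        | some off =>
          simp only
          rw [quantFree_eq, pvFirstQ, pvScanQ_eq]
          cases ht : (work.drop (q + 1)).findIdx? pvIsQ with
          | none => rfl
          | some _ =>
            simp only [Option.map_some, Option.isNone_some, Bool.false_eq_true, if_false]
            rw [ih]
            rw [Option.map_map]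
            apply congrArg (fun f => Option.map f _)
            funext r
            simp [List.append_assoc]

-- ===== VERDICT (by name: the statement is the Claim_ definition above) =====
theorem bound_replace_spec : Claim_equal_bound_replace := by
  intro formula all_vars _ _
  unfold Spec_bound_replace bound_replace bound_replace_alt
  rw [pvLoopB_eq_pvGoA]
  cases pvGoA (formula.toList.length + 1) formula.toList all_vars with
  | none => rfl
  | some r => simp
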